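-- pv_equiv track=rewrite | github.com/apache/libcloud | libcloud/utils/misc.py | str2dicts
-- ===== SOURCE A (Python) =====
-- def str2dicts(data):
--     """
--     Create a list of dictionaries from a whitespace and newline delimited text.
--
--     For example, this:
--     cpu 1100
--     ram 640
--
--     cpu 2200
--     ram 1024
--
--     becomes:
--     [{'cpu': '1100', 'ram': '640'}, {'cpu': '2200', 'ram': '1024'}]
--     """
--     list_data = []
--     list_data.append({})
--     d = list_data[-1]
--
--     lines = data.split('\n')
--     for line in lines:
--         line = line.strip()
--
--         if not line:
--             d = {}
--             list_data.append(d)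
--             d = list_data[-1]
--             continue
--
--         whitespace = line.find(' ')
--
--         if not whitespace:
--             continue
--
--         key = line[0:whitespace]
--         value = line[whitespace + 1:]
--         d.update({key: value})
--
--     list_data = [val for val in list_data if val != {}]
--     return list_data
-- ===== SOURCE B (Python) =====
-- def _block2dict(block):
--     d = {}
--     for line in block:
--         ws = line.find(' ')
--         d[line[:ws]] = line[ws + 1:]
--     return d
--
--
-- def str2dicts(data):
--     # Phase 1: group consecutive non-blank (stripped) lines into blocks.
--     blocks = []
--     cur = []
--     for raw in data.split('\n'):
--         line = raw.strip()
--         if line: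
--             cur.append(line)
--         else:
--             if cur:
--                 blocks.append(cur)
--             cur = []
--     if cur:
--         blocks.append(cur)
--     # Phase 2: turn each block into a dict.
--     return [_block2dict(block) for block in blocks]
-- ===== Notes on version B (the rewrite author's own statement) =====
-- stated objective: alternative
-- what changed: A single pass mutating the last dict of a growing list (appending fresh dicts on blank lines and filtering empties at the end) is replaced by two phases: group consecutive non-blank stripped lines into blocks, then map each block to a dict built with find/slicing.
import Mathlib
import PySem

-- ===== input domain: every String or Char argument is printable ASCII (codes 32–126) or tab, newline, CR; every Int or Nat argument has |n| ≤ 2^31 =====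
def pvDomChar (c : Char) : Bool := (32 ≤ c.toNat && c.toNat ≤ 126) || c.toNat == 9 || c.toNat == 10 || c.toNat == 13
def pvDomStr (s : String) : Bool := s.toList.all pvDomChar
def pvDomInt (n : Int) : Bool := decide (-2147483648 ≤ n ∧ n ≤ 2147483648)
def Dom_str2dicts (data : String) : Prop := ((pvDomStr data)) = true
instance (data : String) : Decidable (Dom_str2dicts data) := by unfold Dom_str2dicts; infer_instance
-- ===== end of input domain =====

-- B re-implements str2dicts in two phases (group stripped lines into blocks, then map each
-- block to a dict) instead of A's single pass mutating the last dict of a growing list;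
-- same return value, no speed claim.


-- ===== PORT A =====
-- A's loop state: (the dicts already pushed into list_data, the current dict d = list_data[-1]).
def pvStepA (st : List (PySem.Dict String String) × PySem.Dict String String) (rawline : String) :
    List (PySem.Dict String String) × PySem.Dict String String :=
  let line := PySem.Str.strip rawline
  if line = "" then
    (st.1 ++ [st.2], PySem.Dict.empty)
  else
    let whitespace := PySem.Str.find line " "
    if whitespace = 0 then st
    else
      let key := PySem.Str.slice line (some 0) (some whitespace)
      let value := PySem.Str.slice line (some (whitespace + 1)) none
      (st.1, st.2.insert key value)

def str2dicts (data : String) : List (List (String × String)) :=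
  let lines := (PySem.Str.split? data "\n").getD []   -- sep is the non-empty literal "\n", so split? never raises
  let st := lines.foldl pvStepA ([], PySem.Dict.empty)
  (((st.1 ++ [st.2]).filter (fun d => decide (d ≠ PySem.Dict.empty))).map PySem.Dict.items)

-- ===== PORT B =====
def pvBlock2dict (block : List String) : PySem.Dict String String :=
  block.foldl (fun d line =>
    let ws := PySem.Str.find line " "
    d.insert (PySem.Str.slice line none (some ws)) (PySem.Str.slice line (some (ws + 1)) none))
    PySem.Dict.empty

-- B's loop state: (finished blocks, current block of consecutive non-blank stripped lines).
def pvStepB (st : List (List String) × List String) (raw : String) :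
    List (List String) × List String :=
  let line := PySem.Str.strip raw
  if line ≠ "" then (st.1, st.2 ++ [line])
  else if st.2 ≠ [] then (st.1 ++ [st.2], [])
  else (st.1, [])

def str2dicts_alt (data : String) : List (List (String × String)) :=
  let st := ((PySem.Str.split? data "\n").getD []).foldl pvStepB ([], [])
  let blocks := if st.2 ≠ [] then st.1 ++ [st.2] else st.1
  blocks.map (fun b => (pvBlock2dict b).items)

-- ===== PRECONDITION & SPEC =====
def Spec_str2dicts (data : String) (out : List (List (String × String))) : Prop := out = str2dicts_alt data
instance (data : String) (out : List (List (String × String))) : Decidable (Spec_str2dicts data out) := by unfold Spec_str2dicts; infer_instance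

-- ===== CLAIM (what is proved, stated in full; the proofs are below) =====
def Claim_equal_str2dicts : Prop := ∀ (data : String), Dom_str2dicts data → Spec_str2dicts data (str2dicts data)


-- ===== LEMMAS AND PROOFS =====

-- A stripped non-empty line does not start with a space, so A's `whitespace == 0` skip never fires.
lemma strip_head_not_space (s : String) :
    PySem.Str.find (PySem.Str.strip s) " " ≠ 0 := by
  intro h0
  rw [PySem.Str.find_eq] at h0
  have hpre : (" ".toList) <+: (PySem.Str.strip s).toList := by
    have h2 := (PySem.Chars.find_spec (s := (PySem.Str.strip s).toList) (sub := " ".toList) (by rw [h0])).1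
    rw [h0] at h2
    simpa using h2
  have hpre2 : (" ".toList) <+: List.dropWhile PySem.Chars.isspace s.toList := by
    refine hpre.trans ?_
    rw [PySem.Str.toList_strip]
    show PySem.Chars.rstrip (PySem.Chars.lstrip s.toList) <+: _
    unfold PySem.Chars.rstrip
    exact (List.reverse_prefix.mpr (List.dropWhile_suffix _)).trans (by simp [PySem.Chars.lstrip])
  obtain ⟨r, hr⟩ := hpre2
  have hne : List.dropWhile PySem.Chars.isspace s.toList ≠ [] := by
    rw [← hr]; simp
  have hh := List.head_dropWhile_not PySem.Chars.isspace hne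
  simp only [← hr] at hh
  simp [PySem.Chars.isspace] at hh

lemma items_insert_ne_nil (d : PySem.Dict String String) (k v : String) : (d.insert k v).items ≠ [] := by
  rw [PySem.Dict.items_insert]
  split
  · rename_i hc
    intro hnil
    simp at hnil
    obtain ⟨l⟩ := d
    simp at hnil
    subst hnil
    simp [PySem.Dict.contains] at hc
  · simp

-- A dict built by B's per-block fold is empty iff the block is empty.
lemma block2dict_items_nil_iff (b : List String) : (pvBlock2dict b).items = [] ↔ b = [] := by
  have gen : ∀ (b : List String) (d : PySem.Dict String String),
      ((b.foldl (fun d line =>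
        let ws := PySem.Str.find line " "
        d.insert (PySem.Str.slice line none (some ws)) (PySem.Str.slice line (some (ws + 1)) none)) d).items = []
        ↔ b = [] ∧ d.items = []) := by
    intro b
    induction b with
    | nil => simp
    | cons l rest ih =>
      intro d
      simp only [List.foldl_cons]
      rw [ih]
      simp [items_insert_ne_nil]
  rw [pvBlock2dict, gen]
  simp [PySem.Dict.empty]

lemma block2dict_ne_empty_iff (b : List String) :
    (decide (pvBlock2dict b ≠ PySem.Dict.empty)) = !(decide (b = [])) := by
  by_cases hb : b = []
  · simp [hb, PySem.Dict.empty, pvBlock2dict]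
  · have hne : pvBlock2dict b ≠ PySem.Dict.empty := by
      intro h
      apply hb
      rw [← block2dict_items_nil_iff, h]
      rfl
    simp [hb, hne]

lemma block2dict_append (b : List String) (l : String) :
    pvBlock2dict (b ++ [l]) =
      (pvBlock2dict b).insert (PySem.Str.slice l none (some (PySem.Str.find l " ")))
        (PySem.Str.slice l (some (PySem.Str.find l " " + 1)) none) := by
  simp [pvBlock2dict, List.foldl_append]

lemma slice_zero_eq_none (l : String) (ws : Int) :
    PySem.Str.slice l (some 0) (some ws) = PySem.Str.slice l none (some ws) := by
  simp [PySem.Str.slice]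

-- The loop invariant tying A's state to B's state, pushed through the whole line list.
lemma main_invariant (ls : List String) (done : List (PySem.Dict String String))
    (bs : List (List String)) (cur : List String)
    (h1 : done.filter (fun d => decide (d ≠ PySem.Dict.empty)) = bs.map pvBlock2dict) :
    (ls.foldl pvStepA (done, pvBlock2dict cur)).1.filter (fun d => decide (d ≠ PySem.Dict.empty)) =
        (ls.foldl pvStepB (bs, cur)).1.map pvBlock2dict ∧
      (ls.foldl pvStepA (done, pvBlock2dict cur)).2 = pvBlock2dict (ls.foldl pvStepB (bs, cur)).2 := by
  induction ls generalizing done bs cur with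
  | nil => exact ⟨h1, rfl⟩
  | cons raw rest ih =>
    simp only [List.foldl_cons]
    by_cases hb : PySem.Str.strip raw = ""
    · have hA : pvStepA (done, pvBlock2dict cur) raw = (done ++ [pvBlock2dict cur], PySem.Dict.empty) := by
        simp [pvStepA, hb]
      have hB : pvStepB (bs, cur) raw = (if cur ≠ [] then bs ++ [cur] else bs, []) := by
        by_cases hc : cur = [] <;> simp [pvStepB, hb, hc]
      rw [hA, hB]
      have h1' : (done ++ [pvBlock2dict cur]).filter (fun d => decide (d ≠ PySem.Dict.empty)) =
          (if cur ≠ [] then bs ++ [cur] else bs).map pvBlock2dict := by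
        rw [List.filter_append, h1, List.filter_singleton, block2dict_ne_empty_iff]
        by_cases hc : cur = [] <;> simp [hc]
      exact ih _ _ [] h1'
    · have hw : PySem.Str.find (PySem.Str.strip raw) " " ≠ 0 := strip_head_not_space raw
      have hw' : PySem.Chars.find (PySem.Chars.strip raw.toList) [' '] ≠ 0 := by
        simpa [PySem.Str.find_eq] using hw
      have hA : pvStepA (done, pvBlock2dict cur) raw = (done, pvBlock2dict (cur ++ [PySem.Str.strip raw])) := by
        rw [block2dict_append]
        simp [pvStepA, hb, hw', slice_zero_eq_none]
      have hB : pvStepB (bs, cur) raw = (bs, cur ++ [PySem.Str.strip raw]) := by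
        simp [pvStepB, hb]
      rw [hA, hB]
      exact ih _ _ _ h1

-- ===== VERDICT (by name: the statement is the Claim_ definition above) =====
theorem str2dicts_spec : Claim_equal_str2dicts := by
  intro data _
  unfold Spec_str2dicts str2dicts str2dicts_alt
  dsimp only
  obtain ⟨H1, H2⟩ := main_invariant ((PySem.Str.split? data "\n").getD []) [] [] [] (by simp)
  simp only [show pvBlock2dict [] = PySem.Dict.empty from rfl] at H1 H2
  rw [List.filter_append, H1, H2, List.filter_singleton, block2dict_ne_empty_iff]
  by_cases hc : (((PySem.Str.split? data "\n").getD []).foldl pvStepB ([], [])).2 = [] <;>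
    simp [hc, List.map_map, Function.comp]
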